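-- pv_equiv track=rewrite | github.com/futurepaycc/automata_practise1 | regexp/naive_test/regexp2.py | expr2
-- ===== SOURCE A (Python) =====
-- from typing import List
--
-- LANG_LETTER = ['a','b','c']
--
-- RE_LETTER = ['+','*','|']
--
-- def expr2(pattern):
--     letters:List = list(pattern)
--
--     res_patten_l:List = []
--
--     cur_re_letter = None
--     cur_lang_letter = None
--     for letter in reversed(letters) : # 用栈的思路, 先处理结尾
--
--         if letter in RE_LETTER:
--             if letter != '|':
--                 cur_re_letter = letter
--             continue
--         elif letter in LANG_LETTER:
--             cur_lang_letter = letter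
--         else:
--             raise Exception("不认识的字母")
--
--         if cur_lang_letter:
--             if cur_re_letter:
--                 res_patten_l.append( (cur_lang_letter,cur_re_letter) )
--             else:
--                 res_patten_l.append( (cur_lang_letter,None) )
--     return list( reversed(res_patten_l) )
-- ===== SOURCE B (Python) =====
-- LANG_LETTER = ['a','b','c']
--
-- RE_LETTER = ['+','*','|']
--
-- def expr2(pattern):
--     res = []
--     buf = []
--     for ch in pattern:
--         if ch in LANG_LETTER:
--             buf.append(ch)
--         elif ch == '|':
--             continue
--         elif ch in RE_LETTER:  # '+' or '*'
--             for l in buf: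
--                 res.append((l, ch))
--             buf = []
--         else:
--             raise Exception("不认识的字母")
--     for l in buf:
--         res.append((l, None))
--     return res
-- ===== Notes on version B (the rewrite author's own statement) =====
-- stated objective: simpler
-- what changed: Replaces A's reversed scan with carried quantifier state (and a final list reversal) by a single forward pass that buffers pending letters and flushes them when a quantifier character arrives, emitting the result directly in order.
import Mathlib
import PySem

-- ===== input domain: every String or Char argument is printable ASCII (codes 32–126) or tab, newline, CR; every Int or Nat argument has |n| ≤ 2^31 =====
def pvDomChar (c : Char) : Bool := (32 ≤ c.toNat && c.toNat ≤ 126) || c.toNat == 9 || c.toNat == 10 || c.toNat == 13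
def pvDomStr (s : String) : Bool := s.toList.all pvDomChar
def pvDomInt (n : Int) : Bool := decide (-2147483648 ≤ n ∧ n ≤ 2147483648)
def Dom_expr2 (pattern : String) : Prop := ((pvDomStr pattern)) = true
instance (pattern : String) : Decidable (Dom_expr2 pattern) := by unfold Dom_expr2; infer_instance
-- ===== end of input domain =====

-- B replaces A's reversed scan with carried quantifier state by a forward pass that buffers
-- letters and flushes them at each quantifier; same O(n) cost, simpler decomposition.


-- ===== PORT A =====
-- A's loop over reversed(letters): state (cur_re_letter, cur_lang_letter, res); on an
-- unknown char Python raises (excluded by Pre_); res is appended to and reversed at the end.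
def expr2LoopA : List Char → Option String → Option String → List (String × Option String) →
    List (String × Option String)
  | [], _, _, res => res
  | c :: rest, curRe, curLang, res =>
    if c = '+' ∨ c = '*' ∨ c = '|' then
      -- letter in RE_LETTER
      if c ≠ '|' then expr2LoopA rest (some (String.ofList [c])) curLang res
      else expr2LoopA rest curRe curLang res
    else if c = 'a' ∨ c = 'b' ∨ c = 'c' then
      -- letter in LANG_LETTER; cur_lang_letter is set (truthy) so the append happens
      match curRe with
      | some q => expr2LoopA rest curRe (some (String.ofList [c])) (res ++ [(String.ofList [c], some q)])
      | none   => expr2LoopA rest curRe (some (String.ofList [c])) (res ++ [(String.ofList [c], none)])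
    else res  -- Python raises here (outside Pre_)

def expr2 (pattern : String) : List (String × Option String) :=
  (expr2LoopA pattern.toList.reverse none none []).reverse

-- ===== PORT B =====
-- Source B's forward pass: buffer of pending letters, flushed with each arriving quantifier,
-- remaining buffer emitted with none at the end; unknown char raises (outside Pre_).
def expr2LoopB : List Char → List String → List (String × Option String)
  | [], buf => buf.map (fun s => (s, none))
  | c :: rest, buf =>
    if c = 'a' ∨ c = 'b' ∨ c = 'c' then expr2LoopB rest (buf ++ [String.ofList [c]])
    else if c = '|' then expr2LoopB rest buf
    else if c = '+' ∨ c = '*' then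
      (buf.map (fun s => (s, some (String.ofList [c])))) ++ expr2LoopB rest []
    else []  -- Python raises here (outside Pre_)

def expr2_alt (pattern : String) : List (String × Option String) :=
  expr2LoopB pattern.toList []

-- ===== PRECONDITION & SPEC =====
-- Pre_ excludes exactly the inputs on which A (and B) raise: any character that is
-- neither a language letter nor a regex operator.
def Pre_expr2 (pattern : String) : Prop :=
  (pattern.toList.all fun c =>
    c == 'a' || c == 'b' || c == 'c' || c == '+' || c == '*' || c == '|') = true
instance (pattern : String) : Decidable (Pre_expr2 pattern) := by unfold Pre_expr2; infer_instance

def pvWitness_expr2 : String := "ab+c|a*b"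

def Spec_expr2 (pattern : String) (out : List (String × Option String)) : Prop := out = expr2_alt pattern
instance (pattern : String) (out : List (String × Option String)) : Decidable (Spec_expr2 pattern out) := by unfold Spec_expr2; infer_instance

-- ===== CLAIM (what is proved, stated in full; the proofs are below) =====
def Claim_equal_expr2 : Prop := ∀ (pattern : String), Dom_expr2 pattern → Pre_expr2 pattern → Spec_expr2 pattern (expr2 pattern)

-- ===== LEMMAS AND PROOFS =====

-- common normal form: each letter is paired with the first quantifier in the rest of the
-- list (default d), quantifiers and '|' produce nothing
def firstQ : List Char → Option String → Option String
  | [], d => d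
  | c :: rest, d => if c = '+' ∨ c = '*' then some (String.ofList [c]) else firstQ rest d

def assignQ : List Char → Option String → List (String × Option String)
  | [], _ => []
  | c :: rest, d =>
    if c = 'a' ∨ c = 'b' ∨ c = 'c' then (String.ofList [c], firstQ rest d) :: assignQ rest d
    else assignQ rest d

def validCs (cs : List Char) : Prop := ∀ c ∈ cs, c ∈ (['a', 'b', 'c', '+', '*', '|'] : List Char)

theorem firstQ_append_quant (l : List Char) (q : Char) (hq : q = '+' ∨ q = '*') (d : Option String) :
    firstQ (l ++ [q]) d = firstQ l (some (String.ofList [q])) := by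
  induction l with
  | nil => simp [firstQ, hq]
  | cons c rest ih => simp only [List.cons_append, firstQ]; split_ifs <;> simp [ih]

theorem firstQ_append_nonq (l : List Char) (c : Char) (hc : ¬ (c = '+' ∨ c = '*')) (d : Option String) :
    firstQ (l ++ [c]) d = firstQ l d := by
  induction l with
  | nil => simp [firstQ, hc]
  | cons c' rest ih => simp only [List.cons_append, firstQ]; split_ifs <;> simp [ih]

theorem assignQ_append_quant (l : List Char) (q : Char) (hq : q = '+' ∨ q = '*') (d : Option String) :
    assignQ (l ++ [q]) d = assignQ l (some (String.ofList [q])) := by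
  induction l with
  | nil => rcases hq with h | h <;> simp [h, assignQ]
  | cons c rest ih =>
    simp only [List.cons_append, assignQ]
    split_ifs with h
    · rw [ih, firstQ_append_quant _ _ hq]
    · exact ih

theorem assignQ_append_letter (l : List Char) (c : Char) (hc : c = 'a' ∨ c = 'b' ∨ c = 'c')
    (d : Option String) :
    assignQ (l ++ [c]) d = assignQ l d ++ [(String.ofList [c], d)] := by
  have hnq : ¬ (c = '+' ∨ c = '*') := by rcases hc with h | h | h <;> simp [h]
  induction l with
  | nil => simp [assignQ, hc, firstQ]
  | cons c' rest ih =>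
    simp only [List.cons_append, assignQ]
    split_ifs with h
    · rw [ih, firstQ_append_nonq _ _ hnq]; simp
    · exact ih

theorem assignQ_append_bar (l : List Char) (d : Option String) :
    assignQ (l ++ ['|']) d = assignQ l d := by
  induction l with
  | nil => simp [assignQ]
  | cons c rest ih =>
    simp only [List.cons_append, assignQ]
    split_ifs with h
    · rw [ih, firstQ_append_nonq]; simp
    · exact ih

theorem expr2LoopA_step_quant (c : Char) (h : c = '+' ∨ c = '*') (rest : List Char)
    (curRe curLang : Option String) (res : List (String × Option String)) :
    expr2LoopA (c :: rest) curRe curLang res =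
      expr2LoopA rest (some (String.ofList [c])) curLang res := by
  simp only [expr2LoopA]
  rw [if_pos (by rcases h with rfl | rfl <;> simp),
    if_pos (show c ≠ '|' by rcases h with rfl | rfl <;> simp)]

theorem expr2LoopA_step_letter (c : Char) (h : c = 'a' ∨ c = 'b' ∨ c = 'c') (rest : List Char)
    (curRe curLang : Option String) (res : List (String × Option String)) :
    expr2LoopA (c :: rest) curRe curLang res =
      expr2LoopA rest curRe (some (String.ofList [c])) (res ++ [(String.ofList [c], curRe)]) := by
  simp only [expr2LoopA]
  rw [if_neg (by rcases h with rfl | rfl | rfl <;> simp), if_pos h]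
  cases curRe <;> rfl

theorem expr2LoopB_step_letter (c : Char) (h : c = 'a' ∨ c = 'b' ∨ c = 'c') (rest : List Char)
    (buf : List String) :
    expr2LoopB (c :: rest) buf = expr2LoopB rest (buf ++ [String.ofList [c]]) := by
  simp only [expr2LoopB]
  rw [if_pos h]

theorem expr2LoopB_step_quant (c : Char) (h : c = '+' ∨ c = '*') (rest : List Char)
    (buf : List String) :
    expr2LoopB (c :: rest) buf =
      (buf.map (fun s => (s, some (String.ofList [c])))) ++ expr2LoopB rest [] := by
  simp only [expr2LoopB]
  rw [if_neg (by rcases h with rfl | rfl <;> simp), if_neg (by rcases h with rfl | rfl <;> simp),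
    if_pos h]

theorem firstQ_step_quant (c : Char) (h : c = '+' ∨ c = '*') (rest : List Char)
    (d : Option String) : firstQ (c :: rest) d = some (String.ofList [c]) := by
  simp only [firstQ]
  rw [if_pos h]

theorem firstQ_step_nonquant (c : Char) (h : ¬ (c = '+' ∨ c = '*')) (rest : List Char)
    (d : Option String) : firstQ (c :: rest) d = firstQ rest d := by
  simp only [firstQ]
  rw [if_neg h]

theorem assignQ_step_letter (c : Char) (h : c = 'a' ∨ c = 'b' ∨ c = 'c') (rest : List Char)
    (d : Option String) :
    assignQ (c :: rest) d = (String.ofList [c], firstQ rest d) :: assignQ rest d := by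
  simp only [assignQ]
  rw [if_pos h]

theorem assignQ_step_nonletter (c : Char) (h : ¬ (c = 'a' ∨ c = 'b' ∨ c = 'c'))
    (rest : List Char) (d : Option String) : assignQ (c :: rest) d = assignQ rest d := by
  simp only [assignQ]
  rw [if_neg h]

theorem expr2LoopA_acc (l : List Char) (curRe curLang : Option String)
    (res : List (String × Option String)) :
    expr2LoopA l curRe curLang res = res ++ expr2LoopA l curRe curLang [] := by
  induction l generalizing curRe curLang res with
  | nil => simp [expr2LoopA]
  | cons c rest ih =>
    by_cases hq : c = '+' ∨ c = '*'
    · rw [expr2LoopA_step_quant c hq, expr2LoopA_step_quant c hq, ih]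
    · by_cases hl : c = 'a' ∨ c = 'b' ∨ c = 'c'
      · rw [expr2LoopA_step_letter c hl, expr2LoopA_step_letter c hl,
          ih _ _ (res ++ _), ih _ _ ([] ++ _)]
        simp
      · by_cases hb : c = '|'
        · subst hb
          have e : ∀ a, expr2LoopA ('|' :: rest) curRe curLang a =
              expr2LoopA rest curRe curLang a := fun _ => rfl
          rw [e, e, ih]
        · have : expr2LoopA (c :: rest) curRe curLang res = res := by
            simp only [expr2LoopA]
            rw [if_neg (by intro h; rcases h with h | h | h; exacts [hq (Or.inl h), hq (Or.inr h), hb h]), if_neg hl]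
          rw [this]
          have : expr2LoopA (c :: rest) curRe curLang [] = [] := by
            simp only [expr2LoopA]
            rw [if_neg (by intro h; rcases h with h | h | h; exacts [hq (Or.inl h), hq (Or.inr h), hb h]), if_neg hl]
          rw [this]
          simp

-- A's loop (which consumes l = cs.reverse) computes assignQ of the original string
theorem expr2LoopA_assignQ (l : List Char) (curRe curLang : Option String)
    (hv : validCs l) :
    (expr2LoopA l curRe curLang []).reverse = assignQ l.reverse curRe := by
  induction l generalizing curRe curLang with
  | nil => simp [expr2LoopA, assignQ]
  | cons c rest ih =>
    have hc : c ∈ (['a', 'b', 'c', '+', '*', '|'] : List Char) := hv c (by simp)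
    have hv' : validCs rest := fun x hx => hv x (by simp [hx])
    simp only [List.mem_cons, List.not_mem_nil, or_false] at hc
    simp only [List.reverse_cons]
    rcases hc with rfl | rfl | rfl | rfl | rfl | rfl
    case inl | inr.inl | inr.inr.inl =>
      -- letter cases 'a','b','c'
      rw [expr2LoopA_step_letter _ (by simp), expr2LoopA_acc, List.reverse_append,
        ih _ _ hv', assignQ_append_letter _ _ (by simp)]
      simp
    case inr.inr.inr.inl | inr.inr.inr.inr.inl =>
      -- quantifier cases '+','*'
      rw [expr2LoopA_step_quant _ (by simp), ih _ _ hv', assignQ_append_quant _ _ (by simp)]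
    case inr.inr.inr.inr.inr =>
      -- '|'
      rw [show expr2LoopA ('|' :: rest) curRe curLang [] = expr2LoopA rest curRe curLang []
          from rfl, ih _ _ hv', assignQ_append_bar]

theorem expr2LoopB_assignQ (cs : List Char) (buf : List String) (hv : validCs cs) :
    expr2LoopB cs buf = buf.map (fun s => (s, firstQ cs none)) ++ assignQ cs none := by
  induction cs generalizing buf with
  | nil => simp [expr2LoopB, firstQ, assignQ]
  | cons c rest ih =>
    have hc : c ∈ (['a', 'b', 'c', '+', '*', '|'] : List Char) := hv c (by simp)
    have hv' : validCs rest := fun x hx => hv x (by simp [hx])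
    simp only [List.mem_cons, List.not_mem_nil, or_false] at hc
    rcases hc with rfl | rfl | rfl | rfl | rfl | rfl
    case inl | inr.inl | inr.inr.inl =>
      rw [expr2LoopB_step_letter _ (by simp), firstQ_step_nonquant _ (by simp),
        assignQ_step_letter _ (by simp), ih _ hv']
      simp
    case inr.inr.inr.inl | inr.inr.inr.inr.inl =>
      rw [expr2LoopB_step_quant _ (by simp), firstQ_step_quant _ (by simp),
        assignQ_step_nonletter _ (by simp), ih _ hv']
      simp
    case inr.inr.inr.inr.inr =>
      rw [show expr2LoopB ('|' :: rest) buf = expr2LoopB rest buf from rfl,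
        firstQ_step_nonquant _ (by simp), assignQ_step_nonletter _ (by simp), ih _ hv']

-- ===== VERDICT (by name: the statement is the Claim_ definition above) =====
theorem expr2_spec : Claim_equal_expr2 := by
  intro pattern _ hpre
  unfold Spec_expr2 expr2 expr2_alt
  have hv : validCs pattern.toList := by
    intro c hc
    have := (List.all_eq_true.mp hpre) c hc
    simp only [Bool.or_eq_true, beq_iff_eq] at this
    simp only [List.mem_cons, List.not_mem_nil, or_false]
    tauto
  have hvr : validCs pattern.toList.reverse := fun c hc => hv c (List.mem_reverse.mp hc)
  rw [expr2LoopA_assignQ _ _ none hvr, List.reverse_reverse,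
    expr2LoopB_assignQ _ _ hv]
  simp
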